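-- pv_equiv track=rewrite | github.com/caohuajia/decoder-of-systemverilog-logic | gen_tree.py | exist_or
-- ===== SOURCE A (Python) =====
-- def exist_or(_str):  ## 括号内的不算
--     pare = 0
--     for i in _str:
--         if i == '(':
--             pare += 1
--             continue
--         if i == ')':
--             pare -= 1
--             continue
--         if pare:
--             continue
--         if i=='|':
--             return True
--     return False
-- ===== SOURCE B (Python) =====
-- def exist_or(_str):
--     # A '|' is at top level iff the prefix before it has as many '(' as ')'.
--     # No running depth state: check each '|' by counting parens in its prefix.
--     return any(c == '|' and _str[:i].count('(') == _str[:i].count(')')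
--                for i, c in enumerate(_str))
-- ===== Notes on version B (the rewrite author's own statement) =====
-- stated objective: alternative
-- what changed: Drops the running depth accumulator entirely: for each '|' found by enumeration, B decides top-levelness by counting '(' and ')' in the prefix before it (balance-by-prefix-count instead of incremental depth tracking).
import Mathlib
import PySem

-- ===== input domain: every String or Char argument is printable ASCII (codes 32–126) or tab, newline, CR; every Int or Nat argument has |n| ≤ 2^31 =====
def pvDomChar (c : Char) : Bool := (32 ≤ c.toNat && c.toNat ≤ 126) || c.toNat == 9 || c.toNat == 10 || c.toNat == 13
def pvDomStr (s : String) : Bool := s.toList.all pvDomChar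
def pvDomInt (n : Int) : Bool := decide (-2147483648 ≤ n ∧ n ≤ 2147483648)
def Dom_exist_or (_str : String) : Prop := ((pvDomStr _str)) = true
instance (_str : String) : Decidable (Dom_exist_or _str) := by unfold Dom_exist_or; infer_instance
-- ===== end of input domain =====

-- B drops A's running depth counter: each '|' found by enumeration is judged top-level
-- by counting '(' and ')' in its prefix (alternative decomposition, not faster).

-- ===== PORT A =====
-- A's loop: state 'pare', early return on a top-level '|'.
def exist_or_loop (l : List Char) (pare : Int) : Bool :=
  match l with
  | [] => false
  | i :: rest =>
    if i = '(' then exist_or_loop rest (pare + 1)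
    else if i = ')' then exist_or_loop rest (pare - 1)
    else if pare ≠ 0 then exist_or_loop rest pare
    else if i = '|' then true
    else exist_or_loop rest pare

def exist_or (_str : String) : Bool := exist_or_loop _str.toList 0

-- ===== PORT B =====
-- _str[:i] with i an enumerate index (≥ 0) is exactly List.take i; str.count of a
-- single character is List.count on the characters.
def exist_or_alt (_str : String) : Bool :=
  (PySem.List.enumerate _str.toList).any (fun p =>
    p.2 = '|' && ((_str.toList.take p.1.toNat).count '(' = (_str.toList.take p.1.toNat).count ')'))

-- ===== PRECONDITION & SPEC =====
def Spec_exist_or (_str : String) (out : Bool) : Prop := out = exist_or_alt _str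
instance (_str : String) (out : Bool) : Decidable (Spec_exist_or _str out) := by unfold Spec_exist_or; infer_instance

-- ===== CLAIM =====
def Claim_equal_exist_or : Prop := ∀ (_str : String), Dom_exist_or _str → Spec_exist_or _str (exist_or _str)

-- ===== LEMMAS AND PROOFS =====
theorem any_congr_mem {α : Type} (l : List α) (f g : α → Bool)
    (h : ∀ x ∈ l, f x = g x) : l.any f = l.any g := by
  induction l with
  | nil => rfl
  | cons x t ih =>
    simp only [List.any_cons]
    rw [h x (by simp), ih (fun y hy => h y (by simp [hy]))]

-- Generalized bridge: A's loop from depth p, over enumeration starting at s, equals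
-- B's per-'|' prefix-count test shifted by p.
theorem exist_or_loop_eq (l : List Char) (p s : Int) :
    exist_or_loop l p
      = (PySem.List.enumerate l s).any (fun q =>
          q.2 = '|' &&
            (p + ((l.take (q.1 - s).toNat).count '(' : Int)
              = ((l.take (q.1 - s).toNat).count ')' : Int))) := by
  induction l generalizing p s with
  | nil => simp [exist_or_loop, PySem.List.enumerate_nil]
  | cons c t ih =>
    rw [exist_or_loop, PySem.List.enumerate_cons, List.any_cons]
    have hrest : ∀ (p' : Int), (hδ : p + ((if c = '(' then (1:Int) else 0) - (if c = ')' then 1 else 0)) = p') →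
        (PySem.List.enumerate t (s+1)).any (fun q =>
          q.2 = '|' &&
            (p' + ((t.take (q.1 - (s+1)).toNat).count '(' : Int)
              = ((t.take (q.1 - (s+1)).toNat).count ')' : Int)))
        = (PySem.List.enumerate t (s+1)).any (fun q =>
          q.2 = '|' &&
            (p + (((c :: t).take (q.1 - s).toNat).count '(' : Int)
              = (((c :: t).take (q.1 - s).toNat).count ')' : Int))) := by
      intro p' hδ
      apply any_congr_mem
      intro q hq
      rcases (PySem.List.mem_enumerate_iff _ _ _).1 hq with ⟨k, hk, rfl⟩
      have h1 : ((s + 1 + (k : Int)) - (s + 1)).toNat = k := by omega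
      have h2 : ((s + 1 + (k : Int)) - s).toNat = k + 1 := by omega
      simp only [h1, h2, List.take_succ_cons, List.count_cons]
      congr 1
      rw [decide_eq_decide]
      simp only [beq_iff_eq] at *
      split_ifs at hδ ⊢ <;> push_cast <;> omega
    by_cases hc1 : c = '('
    · subst hc1
      rw [ih (p+1) (s+1), hrest (p+1) (by simp)]
      simp
    · by_cases hc2 : c = ')'
      · subst hc2
        rw [ih (p-1) (s+1), hrest (p-1) (by simp; ring)]
        simp
      · have hδ : p + ((if c = '(' then (1:Int) else 0) - (if c = ')' then 1 else 0)) = p := by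
          simp [hc1, hc2]
        by_cases hp : p ≠ 0
        · rw [if_neg hc1, if_neg hc2, if_pos hp, ih p (s+1), hrest p hδ]
          have hfirst : ((c = '|') && (p + (((c :: t).take ((s - s).toNat)).count '(' : Int)
              = (((c :: t).take ((s - s).toNat)).count ')' : Int))) = false := by
            simp [hp]
          rw [hfirst, Bool.false_or]
        · rw [if_neg hc1, if_neg hc2, if_neg hp]
          push Not at hp
          subst hp
          by_cases hc3 : c = '|'
          · subst hc3
            simp
          · rw [if_neg hc3, ih 0 (s+1), hrest 0 hδ]
            simp [hc3]

-- ===== VERDICT =====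
theorem exist_or_spec : Claim_equal_exist_or := by
  intro str _
  unfold Spec_exist_or exist_or exist_or_alt
  rw [exist_or_loop_eq str.toList 0 0]
  apply any_congr_mem
  intro q hq
  rcases (PySem.List.mem_enumerate_iff _ _ _).1 hq with ⟨k, hk, rfl⟩
  simp
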